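-- pv_equiv track=rewrite | github.com/G4vp/CIIC-3015 | Labs_Problems/Lab #06 - Practice Functions/Problem.py | MonthToDays
-- ===== SOURCE A (Python) =====
-- def MonthToDays(year,Month):
--     Days = -1
--
--     x = (31,28,31,30,31,30,31,31,30,31,30,31)
--     for i in range(Month-1):
--         Days+= x[i]
--     if(IsLeapYear(year)):
--         return 366-Days
--     return 365-Days
--
-- def IsLeapYear(year):
--     if year%4 == 0 and year%400 == 0 and year%100 == 0:
--         return True
--     elif year%4 == 0 and year%100 == 0:
--         return False
--     elif year%4 == 0:
--         return True
--     return False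
-- ===== SOURCE B (Python) =====
-- _CUM = (0, 31, 59, 90, 120, 151, 181, 212, 243, 273, 304, 334, 365)
--
-- def MonthToDays(year, Month):
--     leap = year % 4 == 0 and (year % 100 != 0 or year % 400 == 0)
--     days_elapsed = _CUM[Month - 1] - 1
--     return (366 if leap else 365) - days_elapsed
-- ===== Notes on version B (the rewrite author's own statement) =====
-- stated objective: simpler
-- what changed: Replaces the per-month accumulation loop with a single lookup in a precomputed cumulative-days prefix table and the four-branch leap-year chain with the standard one-line Gregorian test; Pre_ excludes Month >= 14 (A raises IndexError) and non-positive Month (not a calendar month: A's empty loop leaves its -1 start value while B's table index wraps or raises).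
-- outside the precondition, e.g. on MonthToDays(2024, 0): A returns 367, B returns 2; on MonthToDays(2024, -13): A returns 367, B raises IndexError
import Mathlib
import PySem

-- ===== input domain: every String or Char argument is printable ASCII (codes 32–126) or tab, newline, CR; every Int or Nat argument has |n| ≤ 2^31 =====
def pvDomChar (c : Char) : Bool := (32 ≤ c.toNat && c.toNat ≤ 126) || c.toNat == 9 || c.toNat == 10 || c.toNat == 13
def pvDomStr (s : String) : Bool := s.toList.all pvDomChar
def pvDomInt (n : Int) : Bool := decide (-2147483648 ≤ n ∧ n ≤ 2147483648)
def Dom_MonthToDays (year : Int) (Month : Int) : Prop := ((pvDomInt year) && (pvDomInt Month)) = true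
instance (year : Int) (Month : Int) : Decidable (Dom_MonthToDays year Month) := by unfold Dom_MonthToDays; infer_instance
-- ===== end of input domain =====

-- B replaces A's per-month accumulation loop with a precomputed cumulative-days prefix-table
-- lookup and a one-line leap test (objective: simpler). Equivalence is claimed on valid months 1..13.


-- ===== PORT A =====
def IsLeapYear (year : Int) : Bool :=
  if PySem.Int.mod year 4 == 0 && PySem.Int.mod year 400 == 0 && PySem.Int.mod year 100 == 0 then
    true
  else if PySem.Int.mod year 4 == 0 && PySem.Int.mod year 100 == 0 then
    false
  else if PySem.Int.mod year 4 == 0 then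
    true
  else
    false

def MonthToDays (year : Int) (Month : Int) : Int :=
  let x : List Int := [31, 28, 31, 30, 31, 30, 31, 31, 30, 31, 30, 31]
  -- x[i]: in-range for every i the loop visits when Pre_ holds (Month ≤ 13); Python raises IndexError otherwise
  let Days := (PySem.List.pyRange 0 (Month - 1) 1).foldl
    (fun d i => d + PySem.List.pyGetD x i 0) (-1)
  if IsLeapYear year then 366 - Days else 365 - Days

-- ===== PORT B =====
def cumDays : List Int := [0, 31, 59, 90, 120, 151, 181, 212, 243, 273, 304, 334, 365]

def MonthToDays_alt (year : Int) (Month : Int) : Int :=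
  let leap : Bool :=
    PySem.Int.mod year 4 == 0 && (!(PySem.Int.mod year 100 == 0) || PySem.Int.mod year 400 == 0)
  -- _CUM[Month - 1]: in-range for every Month admitted by Pre_ (1 ≤ Month ≤ 13)
  let elapsed := PySem.List.pyGetD cumDays (Month - 1) 0 - 1
  (if leap then (366 : Int) else 365) - elapsed

-- ===== PRECONDITION & SPEC =====
-- Pre_ excludes Month ≥ 14, where A's x[i] raises IndexError, and non-positive Month — not a
-- calendar month: there A's empty loop leaves its -1 start value while B's table index wraps
-- (Python negative indexing) or raises, and neither accidental value is the specified one.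
def Pre_MonthToDays (year : Int) (Month : Int) : Prop := 1 ≤ Month ∧ Month ≤ 13
instance (year : Int) (Month : Int) : Decidable (Pre_MonthToDays year Month) := by
  unfold Pre_MonthToDays; infer_instance
def pvWitness_MonthToDays : Int × Int := (2024, 3)

def Spec_MonthToDays (year : Int) (Month : Int) (out : Int) : Prop := out = MonthToDays_alt year Month
instance (year : Int) (Month : Int) (out : Int) : Decidable (Spec_MonthToDays year Month out) := by
  unfold Spec_MonthToDays; infer_instance

-- ===== CLAIM (what is proved, stated in full; the proofs are below) =====
def Claim_equal_MonthToDays : Prop := ∀ (year : Int) (Month : Int), Dom_MonthToDays year Month → Pre_MonthToDays year Month → Spec_MonthToDays year Month (MonthToDays year Month)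

-- ===== LEMMAS AND PROOFS =====

-- A's four-branch leap chain computes the standard one-line Gregorian test.
lemma leap_eq (year : Int) :
    IsLeapYear year =
      (PySem.Int.mod year 4 == 0 &&
        (!(PySem.Int.mod year 100 == 0) || PySem.Int.mod year 400 == 0)) := by
  by_cases d400 : (400:Int) ∣ year
  · have d4 : (4:Int) ∣ year := dvd_trans (by norm_num) d400
    have d100 : (100:Int) ∣ year := dvd_trans (by norm_num) d400
    simp [IsLeapYear, d4, d100, d400]
  · by_cases d100 : (100:Int) ∣ year
    · by_cases d4 : (4:Int) ∣ year <;>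
        simp [IsLeapYear, d4, d100, d400]
    · by_cases d4 : (4:Int) ∣ year <;>
        simp [IsLeapYear, d4, d100, d400]

-- A's accumulated Days equals the prefix-table entry minus one, for every Month in 1..13.
lemma days_eq (Month : Int) (h1 : 1 ≤ Month) (h13 : Month ≤ 13) :
    (PySem.List.pyRange 0 (Month - 1) 1).foldl
      (fun d i => d + PySem.List.pyGetD ([31, 28, 31, 30, 31, 30, 31, 31, 30, 31, 30, 31] : List Int) i 0) (-1)
    = PySem.List.pyGetD cumDays (Month - 1) 0 - 1 := by
  interval_cases Month <;> decide

-- ===== VERDICT (by name: the statement is the Claim_ definition above) =====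
theorem MonthToDays_spec : Claim_equal_MonthToDays := by
  intro year Month _ hpre
  show MonthToDays year Month = MonthToDays_alt year Month
  simp only [MonthToDays, MonthToDays_alt, leap_eq, days_eq Month hpre.1 hpre.2]
  split <;> ring
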